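-- pv_equiv track=rewrite | github.com/alexandraback/datacollection | solutions_5753053697277952_0/Python/Pagefault/r1ca.py | solveQuestion
-- ===== SOURCE A (Python) =====
-- def solveQuestion(members):
--     plan = []
--     topParty = max(members)
--     while 0 != topParty:
--         first = members.index(topParty)
--         members[first] -= 1
--         secondParty = max(members)
--         second = None
--         if 0 != secondParty:
--             total = sum(members)
--             second = members.index(secondParty)
--             members[second] -= 1
--             if 1 == sum(members):
--                 members[second] += 1
--                 second = None
--         plan.append((first, second))
--         topParty = max(members)
--     result = ''
--     for first, second in plan:
--         result += chr(ord('A') + first)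
--         if None != second:
--             result += chr(ord('A') + second)
--         result += ' '
--     return result.strip()
-- ===== SOURCE B (Python) =====
-- def solveQuestion(members):
--     # Priority queue: a list of (-count, index) pairs kept sorted ascending
--     # (lexicographically), so q[0] is always the largest count, smallest index.
--     # Built once by ordered insertion; each round pops the head(s) and
--     # re-inserts the decremented entries; the total is kept incrementally.
--     q = []
--     for i, c in enumerate(members):
--         _insert(q, (-c, i))
--     s = sum(members)
--     out = []
--     while -q[0][0] > 0:
--         c1, i1 = q.pop(0)
--         _insert(q, (c1 + 1, i1))          # leader, decremented, back in line
--         c2, i2 = q[0]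
--         if -c2 > 0 and s != 3:
--             q.pop(0)
--             _insert(q, (c2 + 1, i2))
--             s -= 2
--             out.append(chr(65 + i1) + chr(65 + i2))
--         else:
--             s -= 1
--             out.append(chr(65 + i1))
--     return ' '.join(out)
--
--
-- def _insert(q, item):
--     k = 0
--     while k < len(q) and q[k] < item:
--         k += 1
--     q.insert(k, item)
-- ===== Notes on version B (the rewrite author's own statement) =====
-- stated objective: alternative
-- what changed: B never rescans the counts list: it builds a priority queue of (-count, index) pairs once (sorted by ordered insertion), pops the head(s) each round and re-inserts the decremented entries, keeping the running total incrementally and joining the collected tokens once, instead of A's six full passes per round (max, index, max, index, sum, sum) over the mutated list plus repeated string concatenation.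
import Mathlib
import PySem

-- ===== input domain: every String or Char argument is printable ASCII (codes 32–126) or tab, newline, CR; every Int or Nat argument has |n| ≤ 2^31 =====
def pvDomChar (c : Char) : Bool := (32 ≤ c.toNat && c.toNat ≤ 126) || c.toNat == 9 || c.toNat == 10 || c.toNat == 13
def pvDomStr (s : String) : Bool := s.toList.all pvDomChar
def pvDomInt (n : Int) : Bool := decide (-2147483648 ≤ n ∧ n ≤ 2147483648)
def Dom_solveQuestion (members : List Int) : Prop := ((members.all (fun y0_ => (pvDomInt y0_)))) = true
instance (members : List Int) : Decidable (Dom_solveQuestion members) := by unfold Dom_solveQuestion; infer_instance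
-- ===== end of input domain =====

-- B replaces A's per-round rescans of `members` (max, index, max, index, sum, sum) by a
-- priority queue: a list of (-count, index) pairs kept sorted by ordered insertion, popped
-- at the head, with the total maintained incrementally; equivalence is about the RETURN
-- value only (A mutates its argument in place, B does not).

-- chr(ord('A') + i), used by both ports
def pvChr (i : Int) : Char := Char.ofNat (65 + i).toNat

-- ===== PORT A =====

def solveQuestionLoop (fuel : Nat) (ms : List Int) (plan : List (Int × Option Int)) :
    List (Int × Option Int) :=
  match fuel with
  | 0 => plan
  | fuel + 1 =>
    match PySem.List.max? ms (fun x => x) with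
    | none => plan
    | some topParty =>
      if topParty = 0 then plan
      else
        match PySem.List.index? ms topParty with
        | none => plan
        | some first =>
          let ms1 := ms.set first (ms.getD first 0 - 1)
          match PySem.List.max? ms1 (fun x => x) with
          | none => plan
          | some secondParty =>
            if secondParty ≠ 0 then
              let _total := ms1.sum
              match PySem.List.index? ms1 secondParty with
              | none => plan
              | some second =>
                let ms2 := ms1.set second (ms1.getD second 0 - 1)
                if ms2.sum = 1 then
                  solveQuestionLoop fuel ms1 (plan ++ [((first : Int), none)])
                else
                  solveQuestionLoop fuel ms2 (plan ++ [((first : Int), some (second : Int))])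
            else
              solveQuestionLoop fuel ms1 (plan ++ [((first : Int), none)])

def solveQuestion (members : List Int) : String :=
  match PySem.List.max? members (fun x => x) with
  | none => ""                -- max([]) raises ValueError in Python; outside Pre_
  | some _ =>
    -- fuel: each iteration removes at least one unit from the positive mass
    let fuel := ((members.map (fun x => max x 0)).sum).toNat + 1
    let plan := solveQuestionLoop fuel members []
    let result := plan.foldl (fun acc p =>
      let acc1 := acc ++ [pvChr p.1]
      let acc2 := match p.2 with
        | some second => acc1 ++ [pvChr second]
        | none => acc1
      acc2 ++ [' ']) ([] : List Char)
    String.ofList (PySem.Chars.strip result)   -- result.strip()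

-- ===== PORT B =====

-- Python's `q[k] < item` on int pairs: lexicographic tuple comparison
def pairLt (a b : Int × Int) : Bool := decide (a.1 < b.1 ∨ (a.1 = b.1 ∧ a.2 < b.2))

-- _insert(q, item): advance past the elements `< item`, insert there (exact: the
-- while-loop stops at the first k with ¬(q[k] < item) and list.insert puts item there)
def pvInsert (item : Int × Int) : List (Int × Int) → List (Int × Int)
  | [] => [item]
  | x :: rest => if pairLt x item then x :: pvInsert item rest else item :: x :: rest

def solveQuestionAltLoop (fuel : Nat) (q : List (Int × Int)) (s : Int) (out : List (List Char)) :
    List (List Char) :=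
  match fuel with
  | 0 => out
  | fuel + 1 =>
    match q with
    | [] => out       -- q[0] raises IndexError in Python; unreachable under Pre_
    | (c1, i1) :: rest =>
      if -c1 > 0 then
        let q1 := pvInsert (c1 + 1, i1) rest
        match q1 with
        | [] => out   -- unreachable: pvInsert never returns []
        | (c2, i2) :: rest2 =>
          if -c2 > 0 ∧ s ≠ 3 then
            solveQuestionAltLoop fuel (pvInsert (c2 + 1, i2) rest2) (s - 2)
              (out ++ [[pvChr i1, pvChr i2]])
          else
            solveQuestionAltLoop fuel ((c2, i2) :: rest2) (s - 1) (out ++ [[pvChr i1]])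
      else out

def solveQuestion_alt (members : List Int) : String :=
  let q0 := (PySem.List.enumerate members 0).foldl (fun q p => pvInsert (-p.2, p.1) q) []
  -- fuel: totality guard only; the Python while-loop needs no counter
  let fuel := ((members.map (fun x => max x 0)).sum).toNat + 1
  String.ofList (PySem.Chars.join [' '] (solveQuestionAltLoop fuel q0 members.sum []))

-- ===== PRECONDITION & SPEC =====
-- Pre_ excludes the empty list (A raises ValueError on max([])), lists whose maximum is
-- negative (A's while-loop never terminates), and lists of more than 68 parties, where the
-- party letters chr(65+i) reach Unicode whitespace characters (chr(133) = '\x85' for the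
-- 69th party) and A's final strip() silently deletes such letters from the ends of the
-- schedule — an artefact of A's string assembly.
def Pre_solveQuestion (members : List Int) : Prop :=
  members ≠ [] ∧ (∃ x ∈ members, 0 ≤ x) ∧ members.length ≤ 68
instance (members : List Int) : Decidable (Pre_solveQuestion members) := by
  unfold Pre_solveQuestion; infer_instance

def pvWitness_solveQuestion : List Int := [2, 1]

def Spec_solveQuestion (members : List Int) (out : String) : Prop := out = solveQuestion_alt members
instance (members : List Int) (out : String) : Decidable (Spec_solveQuestion members out) := by
  unfold Spec_solveQuestion; infer_instance

-- ===== CLAIM (what is proved, stated in full; the proofs are below) =====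
def Claim_equal_solveQuestion : Prop := ∀ (members : List Int), Dom_solveQuestion members →
  Pre_solveQuestion members → Spec_solveQuestion members (solveQuestion members)

-- ===== LEMMAS AND PROOFS =====

-- one schedule entry of A, rendered as B's token
def renderPair (p : Int × Option Int) : List Char :=
  match p.2 with
  | some second => [pvChr p.1, pvChr second]
  | none => [pvChr p.1]

-- the queue entries of a counts list: (-count, index), one per position
def pvKeys (ms : List Int) : List (Int × Int) :=
  (List.range ms.length).map (fun i => (-(ms.getD i 0), (i : Int)))

-- the queue invariant: sorted (weakly, under Python's tuple order) and a permutation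
-- of the entries of the counts list
def QRep (ms : List Int) (q : List (Int × Int)) : Prop :=
  q.Pairwise (fun a b => pairLt b a = false) ∧ q.Perm (pvKeys ms)

lemma pairLt_false_iff (a b : Int × Int) :
    pairLt a b = false ↔ b.1 ≤ a.1 ∧ (a.1 = b.1 → b.2 ≤ a.2) := by
  simp only [pairLt, decide_eq_false_iff_not]
  omega

lemma pairLt_asymm (a b : Int × Int) (h : pairLt a b = true) : pairLt b a = false := by
  simp only [pairLt, decide_eq_true_eq] at h
  rw [pairLt_false_iff]
  omega

lemma pairLt_false_trans (a b c : Int × Int)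
    (h1 : pairLt b a = false) (h2 : pairLt c b = false) : pairLt c a = false := by
  rw [pairLt_false_iff] at *
  omega

lemma pvInsert_perm (item : Int × Int) (q : List (Int × Int)) :
    (pvInsert item q).Perm (item :: q) := by
  induction q with
  | nil => simp [pvInsert]
  | cons x rest ih =>
    by_cases h : pairLt x item
    · simp only [pvInsert, if_pos h]
      exact (ih.cons x).trans (List.Perm.swap item x rest)
    · simp [pvInsert, if_neg h]

lemma mem_pvInsert (item y : Int × Int) (q : List (Int × Int)) (h : y ∈ pvInsert item q) :
    y = item ∨ y ∈ q := by
  have := (pvInsert_perm item q).mem_iff.mp h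
  simpa using this

lemma pvInsert_pairwise (item : Int × Int) (q : List (Int × Int))
    (hq : q.Pairwise (fun a b => pairLt b a = false)) :
    (pvInsert item q).Pairwise (fun a b => pairLt b a = false) := by
  induction q with
  | nil => simp [pvInsert]
  | cons x rest ih =>
    rw [List.pairwise_cons] at hq
    obtain ⟨hx, hrest⟩ := hq
    by_cases h : pairLt x item
    · simp only [pvInsert, if_pos h]
      rw [List.pairwise_cons]
      refine ⟨?_, ih hrest⟩
      intro y hy
      rcases mem_pvInsert item y rest hy with rfl | hy'
      · exact pairLt_asymm x y h
      · exact hx y hy'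
    · simp only [pvInsert, if_neg h]
      rw [List.pairwise_cons]
      refine ⟨?_, List.Pairwise.cons hx hrest⟩
      intro y hy
      rcases List.mem_cons.mp hy with rfl | hy'
      · exact Bool.eq_false_iff.mpr h
      · exact pairLt_false_trans item x y (Bool.eq_false_iff.mpr h) (hx y hy')

-- building the queue by repeated ordered insertion: a sorted permutation of the input
lemma foldl_pvInsert_perm (g : Int × Int → Int × Int) (l : List (Int × Int))
    (q : List (Int × Int)) :
    (l.foldl (fun q p => pvInsert (g p) q) q).Perm (q ++ l.map g) := by
  induction l generalizing q with
  | nil => simp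
  | cons x l ih =>
    rw [List.foldl_cons, List.map_cons]
    exact (ih (pvInsert (g x) q)).trans
      (((pvInsert_perm (g x) q).append_right _).trans List.perm_middle.symm)

lemma foldl_pvInsert_pairwise (g : Int × Int → Int × Int) (l : List (Int × Int))
    (q : List (Int × Int)) (hq : q.Pairwise (fun a b => pairLt b a = false)) :
    (l.foldl (fun q p => pvInsert (g p) q) q).Pairwise (fun a b => pairLt b a = false) := by
  induction l generalizing q with
  | nil => exact hq
  | cons x l ih => exact ih _ (pvInsert_pairwise _ _ hq)

lemma mem_pvKeys (ms : List Int) (p : Int × Int) :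
    p ∈ pvKeys ms ↔ ∃ k : Nat, k < ms.length ∧ p = (-(ms.getD k 0), (k : Int)) := by
  simp only [pvKeys, List.mem_map, List.mem_range]
  constructor
  · rintro ⟨k, hk, rfl⟩; exact ⟨k, hk, rfl⟩
  · rintro ⟨k, hk, rfl⟩; exact ⟨k, hk, rfl⟩

lemma pvKeys_eq_enumerate (ms : List Int) :
    (PySem.List.enumerate ms 0).map (fun p => (-p.2, p.1)) = pvKeys ms := by
  apply List.ext_getElem
  · simp [pvKeys, PySem.List.length_enumerate]
  · intro j h1 h2
    have hj : j < ms.length := by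
      simpa [PySem.List.length_enumerate] using h1
    rw [List.getElem_map, PySem.List.getElem_enumerate ms 0 j
      (by simpa [PySem.List.length_enumerate] using hj)]
    simp only [pvKeys, List.getElem_map, List.getElem_range]
    rw [List.getD_eq_getElem _ _ hj]
    simp

lemma rep_initial (ms : List Int) :
    QRep ms ((PySem.List.enumerate ms 0).foldl (fun q p => pvInsert (-p.2, p.1) q) []) := by
  constructor
  · exact foldl_pvInsert_pairwise (fun p => (-p.2, p.1)) _ [] (by simp)
  · have := foldl_pvInsert_perm (fun p => (-p.2, p.1)) (PySem.List.enumerate ms 0) []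
    rw [List.nil_append, pvKeys_eq_enumerate] at this
    exact this

lemma getD_set_int (ms : List Int) (k j : Nat) (v : Int) (hj : j < ms.length) :
    (ms.set k v).getD j 0 = if k = j then v else ms.getD j 0 := by
  rw [List.getD_eq_getElem _ _ (by simpa using hj), List.getElem_set]
  split
  · rfl
  · rw [List.getD_eq_getElem _ _ hj]

lemma sum_set_int (ms : List Int) (k : Nat) (v : Int) (hk : k < ms.length) :
    (ms.set k v).sum = ms.sum - ms.getD k 0 + v := by
  rw [List.sum_set, if_pos hk, List.getD_eq_getElem _ _ hk]
  have hms : ms.sum = (ms.take k).sum + (ms[k] + (ms.drop (k+1)).sum) := by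
    conv_lhs => rw [← List.take_append_drop k ms, List.drop_eq_getElem_cons hk]
    rw [List.sum_append, List.sum_cons]
  rw [hms]; ring

lemma max?_eq_of (ms : List Int) (v : Int) (k : Nat) (hk : k < ms.length)
    (hv : ms.getD k 0 = v) (hle : ∀ j : Nat, j < ms.length → ms.getD j 0 ≤ v) :
    PySem.List.max? ms (fun x => x) = some v := by
  have hvmem : v ∈ ms := by
    rw [← hv, List.getD_eq_getElem _ _ hk]; exact List.getElem_mem hk
  cases h : PySem.List.max? ms (fun x => x) with
  | none =>
    rw [PySem.List.max?_eq_none_iff] at h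
    subst h; simp at hk
  | some m =>
    have hm : m ∈ ms := PySem.List.max?_mem h
    obtain ⟨j, hj, hjm⟩ := List.mem_iff_getElem.mp hm
    have h1 : m ≤ v := by
      have := hle j hj; rw [List.getD_eq_getElem _ _ hj, hjm] at this; exact this
    have h2 : v ≤ m := PySem.List.max?_isMax h v hvmem
    rw [le_antisymm h1 h2]

lemma index?_eq_of (ms : List Int) (v : Int) (k : Nat) (hk : k < ms.length)
    (hv : ms.getD k 0 = v) (hlt : ∀ j : Nat, j < k → ms.getD j 0 ≠ v) :
    PySem.List.index? ms v = some k := by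
  have hgk : ms[k] = v := by rw [← List.getD_eq_getElem _ 0 hk, hv]
  have hvmem : v ∈ ms := by rw [← hgk]; exact List.getElem_mem hk
  have hsome := (PySem.List.index?_isSome_iff ms v).mpr hvmem
  obtain ⟨k', hk'⟩ := Option.isSome_iff_exists.mp hsome
  obtain ⟨hk'len, hgk', hfirst⟩ := PySem.List.getElem_of_index?_eq_some hk'
  rcases Nat.lt_trichotomy k' k with h | h | h
  · exact absurd (by rw [List.getD_eq_getElem _ _ hk'len, hgk']) (hlt k' h)
  · rw [hk', h]
  · exact absurd hgk (hfirst k h)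

lemma mem_of_getD (ms : List Int) (k : Nat) (hk : k < ms.length) : ms.getD k 0 ∈ ms := by
  rw [List.getD_eq_getElem _ _ hk]; exact List.getElem_mem hk

-- what the head of the sorted queue says about the counts list: it is A's max(members)
-- with its first index, and the tail still represents the rest
lemma rep_head (ms : List Int) (q : List (Int × Int)) (h : QRep ms q) (hne : ms ≠ []) :
    ∃ (c1 i1 : Int) (rest : List (Int × Int)) (k1 : Nat),
      q = (c1, i1) :: rest ∧ i1 = (k1 : Int) ∧ k1 < ms.length ∧
      ms.getD k1 0 = -c1 ∧
      (∀ j : Nat, j < ms.length → ms.getD j 0 ≤ -c1) ∧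
      PySem.List.max? ms (fun x => x) = some (-c1) ∧
      PySem.List.index? ms (-c1) = some k1 := by
  obtain ⟨hsort, hperm⟩ := h
  cases hq : q with
  | nil =>
    exfalso
    rw [hq] at hperm
    have := hperm.symm.length_eq
    simp [pvKeys] at this
    exact hne this
  | cons hd rest =>
    obtain ⟨c1, i1⟩ := hd
    rw [hq] at hsort hperm
    have hmem : (c1, i1) ∈ pvKeys ms := hperm.mem_iff.mp (by simp)
    obtain ⟨k1, hk1, hpk⟩ := (mem_pvKeys ms _).mp hmem
    have hc1 : -(ms.getD k1 0) = c1 := by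
      have := congrArg Prod.fst hpk; simpa using this.symm
    have hi1 : i1 = (k1 : Int) := by
      have := congrArg Prod.snd hpk; simpa using this
    rw [List.pairwise_cons] at hsort
    obtain ⟨hhead, hrest⟩ := hsort
    -- every queue entry is lex-≥ the head
    have hall : ∀ p ∈ (c1, i1) :: rest, pairLt p (c1, i1) = false := by
      intro p hp
      rcases List.mem_cons.mp hp with rfl | hp'
      · rw [pairLt_false_iff]; omega
      · exact hhead p hp'
    have hle : ∀ j : Nat, j < ms.length → ms.getD j 0 ≤ -c1 := by
      intro j hj
      have hmemj : (-(ms.getD j 0), (j : Int)) ∈ (c1, i1) :: rest :=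
        hperm.symm.mem_iff.mp ((mem_pvKeys ms _).mpr ⟨j, hj, rfl⟩)
      have := hall _ hmemj
      rw [pairLt_false_iff] at this
      simp only at this
      omega
    have hfirst : ∀ j : Nat, j < k1 → ms.getD j 0 ≠ -c1 := by
      intro j hj hcon
      have hjlen : j < ms.length := by omega
      have hmemj : (-(ms.getD j 0), (j : Int)) ∈ (c1, i1) :: rest :=
        hperm.symm.mem_iff.mp ((mem_pvKeys ms _).mpr ⟨j, hjlen, rfl⟩)
      have := hall _ hmemj
      rw [pairLt_false_iff] at this
      simp only at this
      omega
    exact ⟨c1, i1, rest, k1, rfl, hi1, hk1, by omega, hle,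
      max?_eq_of ms (-c1) k1 hk1 (by omega) hle,
      index?_eq_of ms (-c1) k1 hk1 (by omega) hfirst⟩

-- popping the head and re-inserting the updated entry represents the updated counts
lemma rep_set (ms : List Int) (c1 i1 : Int) (rest : List (Int × Int)) (k1 : Nat) (v : Int)
    (hRep : QRep ms ((c1, i1) :: rest)) (hi1 : i1 = (k1 : Int)) (hk1 : k1 < ms.length) :
    QRep (ms.set k1 v) (pvInsert (-v, i1) rest) := by
  obtain ⟨hsort, hperm⟩ := hRep
  rw [List.pairwise_cons] at hsort
  constructor
  · exact pvInsert_pairwise _ _ hsort.2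
  · -- decompose pvKeys ms around position k1
    have hlenK : (pvKeys ms).length = ms.length := by simp [pvKeys]
    have hkK : k1 < (pvKeys ms).length := by omega
    have hmem : (c1, i1) ∈ pvKeys ms := hperm.mem_iff.mp (by simp)
    obtain ⟨k1', hk1', hpk⟩ := (mem_pvKeys ms _).mp hmem
    have hk1eq : k1' = k1 := by
      have := congrArg Prod.snd hpk
      simp only [hi1] at this
      omega
    rw [hk1eq] at hpk
    have hc1 : c1 = -(ms.getD k1 0) := by
      have := congrArg Prod.fst hpk; simpa using this
    have hgetK : (pvKeys ms)[k1] = (c1, i1) := by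
      simp only [pvKeys, List.getElem_map, List.getElem_range]
      rw [hi1, hc1]
    have hsplit : pvKeys ms = (pvKeys ms).take k1 ++ (c1, i1) :: (pvKeys ms).drop (k1 + 1) := by
      conv_lhs => rw [← List.take_append_drop k1 (pvKeys ms), List.drop_eq_getElem_cons hkK]
      rw [hgetK]
    have hnotin : (c1, i1) ∉ (pvKeys ms).take k1 := by
      intro hcon
      obtain ⟨j, hj, hjget⟩ := List.mem_take_iff_getElem.mp hcon
      have hjk : j < k1 := by omega
      have hthis : (pvKeys ms)[j]'(by omega) = (-(ms.getD j 0), (j : Int)) := by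
        simp [pvKeys]
      rw [hthis] at hjget
      have := congrArg Prod.snd hjget
      simp only [hi1] at this
      omega
    -- erase removes exactly the head entry
    have herase : (pvKeys ms).erase (c1, i1) =
        (pvKeys ms).take k1 ++ (pvKeys ms).drop (k1 + 1) := by
      conv_lhs => rw [hsplit]
      rw [List.erase_append_right _ hnotin, List.erase_cons_head]
    -- keys of the updated list: the same entries with position k1 replaced
    have hkeysSet : pvKeys (ms.set k1 v) = (pvKeys ms).set k1 (-v, (k1 : Int)) := by
      apply List.ext_getElem
      · simp [pvKeys]
      · intro j h1 h2
        have hj : j < ms.length := by simpa [pvKeys] using h1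
        rw [List.getElem_set]
        simp only [pvKeys, List.getElem_map, List.getElem_range]
        rw [getD_set_int ms k1 j v hj]
        by_cases hkj : k1 = j
        · subst hkj; simp
        · simp [hkj]
    have hsetSplit : (pvKeys ms).set k1 (-v, (k1 : Int)) =
        (pvKeys ms).take k1 ++ (-v, (k1 : Int)) :: (pvKeys ms).drop (k1 + 1) :=
      List.set_eq_take_cons_drop _ hkK
    refine (pvInsert_perm _ _).trans ?_
    have hrestP : rest.Perm ((pvKeys ms).erase (c1, i1)) :=
      (hperm.trans (List.perm_cons_erase hmem)).cons_inv
    refine ((hrestP.cons ((-v, i1) : Int × Int)).trans ?_)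
    rw [herase, hkeysSet, hsetSplit, hi1]
    exact List.perm_middle.symm

-- the two loops produce the same schedule, rendered as tokens
lemma loops_eq : ∀ (fuel : Nat) (ms : List Int) (q : List (Int × Int))
    (plan : List (Int × Option Int)) (tokens : List (List Char)) (s : Int),
    QRep ms q → ms ≠ [] → (∃ x ∈ ms, 0 ≤ x) → s = ms.sum → tokens = plan.map renderPair →
    (solveQuestionLoop fuel ms plan).map renderPair = solveQuestionAltLoop fuel q s tokens := by
  intro fuel
  induction fuel with
  | zero =>
    intro ms q plan tokens s _ _ _ _ ht
    simp [solveQuestionLoop, solveQuestionAltLoop, ht]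
  | succ fuel ih =>
    intro ms q plan tokens s hRep hne hnn hs ht
    obtain ⟨c1, i1, rest, k1, hq, hi1, hk1, hval, hle, hmax, hidx⟩ := rep_head ms q hRep hne
    subst hq
    have hc1nn : 0 ≤ -c1 := by
      obtain ⟨x, hxmem, hx0⟩ := hnn
      obtain ⟨j, hj, hjx⟩ := List.mem_iff_getElem.mp hxmem
      have := hle j hj
      rw [List.getD_eq_getElem _ _ hj, hjx] at this
      omega
    rw [solveQuestionLoop, solveQuestionAltLoop, hmax]
    dsimp only
    by_cases h0 : -c1 = 0
    · rw [if_pos (by omega), if_neg (by omega), ht]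
    · have hpos : 0 < -c1 := by omega
      rw [if_neg (by omega), if_pos (by omega), hidx]
      dsimp only
      have hmsval : ms.getD k1 0 - 1 = -c1 - 1 := by omega
      rw [hmsval]
      set ms1 := ms.set k1 (-c1 - 1) with hms1
      have hq1 : pvInsert (c1 + 1, i1) rest = pvInsert (-(-c1 - 1), i1) rest := by
        rw [show -(-c1 - 1) = c1 + 1 by ring]
      have hRep1 : QRep ms1 (pvInsert (c1 + 1, i1) rest) := by
        rw [hq1]
        exact rep_set ms c1 i1 rest k1 (-c1 - 1) hRep hi1 hk1
      have hlen1 : ms1.length = ms.length := by simp [hms1]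
      have hne1 : ms1 ≠ [] := by
        intro hcon; rw [← List.length_eq_zero_iff, hlen1] at hcon
        omega
      have hgd1k1 : ms1.getD k1 0 = -c1 - 1 := by
        rw [hms1, getD_set_int ms k1 k1 _ hk1, if_pos rfl]
      have hnn1 : ∃ x ∈ ms1, 0 ≤ x :=
        ⟨ms1.getD k1 0, mem_of_getD ms1 k1 (by omega), by omega⟩
      have hsum1 : ms1.sum = ms.sum - 1 := by
        rw [hms1, sum_set_int ms k1 _ hk1, hval]; ring
      obtain ⟨c2, i2, rest2, k2, hq1eq, hi2, hk2, hval2, hle2, hmax2, hidx2⟩ :=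
        rep_head ms1 (pvInsert (c1 + 1, i1) rest) hRep1 hne1
      rw [hmax2, hq1eq]
      dsimp only
      have hc2ge : -c1 - 1 ≤ -c2 := by
        have := hle2 k1 (by omega)
        rw [hgd1k1] at this
        omega
      rw [hlen1] at hk2
      by_cases h2 : -c2 = 0
      · -- no positive second party: a single-speaker round in both programs
        rw [if_neg (by omega), if_neg (by rintro ⟨h, -⟩; omega)]
        exact ih ms1 ((c2, i2) :: rest2) _ _ _
          (hq1eq ▸ hRep1) hne1 hnn1 (by omega)
          (by rw [ht]; simp [renderPair, hi1])
      · have h2pos : 0 < -c2 := by omega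
        rw [if_pos (by omega), hidx2]
        dsimp only
        have hmsval2 : ms1.getD k2 0 - 1 = -c2 - 1 := by omega
        rw [hmsval2]
        set ms2 := ms1.set k2 (-c2 - 1) with hms2
        have hsum2 : ms2.sum = ms.sum - 2 := by
          rw [hms2, sum_set_int ms1 k2 _ (by omega), hval2, hsum1]; ring
        by_cases hs3 : s = 3
        · -- the undo branch: both programs record a single speaker
          rw [if_pos (by omega), if_neg (by simp [hs3])]
          exact ih ms1 ((c2, i2) :: rest2) _ _ _
            (hq1eq ▸ hRep1) hne1 hnn1 (by omega)
            (by rw [ht]; simp [renderPair, hi1])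
        · -- a paired round
          rw [if_neg (by omega), if_pos ⟨by omega, hs3⟩]
          have hRep2 : QRep ms2 (pvInsert (c2 + 1, i2) rest2) := by
            have : pvInsert (c2 + 1, i2) rest2 = pvInsert (-(-c2 - 1), i2) rest2 := by
              rw [show -(-c2 - 1) = c2 + 1 by ring]
            rw [this, hms2]
            exact rep_set ms1 c2 i2 rest2 k2 (-c2 - 1) (hq1eq ▸ hRep1) hi2 (by omega)
          have hlen2 : ms2.length = ms.length := by simp [hms2, hms1]
          have hne2 : ms2 ≠ [] := by
            intro hcon; rw [← List.length_eq_zero_iff, hlen2] at hcon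
            omega
          have hgd2k2 : ms2.getD k2 0 = -c2 - 1 := by
            rw [hms2, getD_set_int ms1 k2 k2 _ (by omega), if_pos rfl]
          have hnn2 : ∃ x ∈ ms2, 0 ≤ x :=
            ⟨ms2.getD k2 0, mem_of_getD ms2 k2 (by omega), by omega⟩
          exact ih ms2 (pvInsert (c2 + 1, i2) rest2) _ _ _
            hRep2 hne2 hnn2 (by omega)
            (by rw [ht]; simp [renderPair, hi1, hi2])

-- every token of the schedule is nonempty and uses only the letters chr(65)…chr(132)
def GoodTok (t : List Char) : Prop := t ≠ [] ∧ ∀ c ∈ t, 65 ≤ c.toNat ∧ c.toNat ≤ 132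

lemma pvChr_good (i : Int) (h0 : 0 ≤ i) (h1 : i ≤ 67) :
    65 ≤ (pvChr i).toNat ∧ (pvChr i).toNat ≤ 132 := by
  have hv : ((65 + i).toNat).isValidChar := by left; omega
  unfold pvChr
  rw [show (Char.ofNat (65 + i).toNat).toNat = (65 + i).toNat from by simp [Char.ofNat, hv]]
  omega

lemma notspace_of_good (c : Char) (h1 : 65 ≤ c.toNat) (h2 : c.toNat ≤ 132) :
    PySem.Chars.isspace c = false := by
  simp [PySem.Chars.isspace]; omega

lemma altLoop_good : ∀ (fuel : Nat) (q : List (Int × Int)) (s : Int)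
    (tokens : List (List Char)),
    (∀ p ∈ q, 0 ≤ p.2 ∧ p.2 ≤ 67) → (∀ t ∈ tokens, GoodTok t) →
    ∀ t ∈ solveQuestionAltLoop fuel q s tokens, GoodTok t := by
  intro fuel
  induction fuel with
  | zero => intro q s tokens _ hg; simpa [solveQuestionAltLoop] using hg
  | succ fuel ih =>
    intro q s tokens hidx hg
    match q with
    | [] => simpa [solveQuestionAltLoop] using hg
    | (c1, i1) :: rest =>
      rw [solveQuestionAltLoop]
      dsimp only
      by_cases hv : -c1 > 0
      case neg => rw [if_neg hv]; exact hg
      case pos =>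
      rw [if_pos hv]
      have hb1 : 0 ≤ i1 ∧ i1 ≤ 67 := hidx (c1, i1) (by simp)
      have hidx1 : ∀ p ∈ pvInsert (c1 + 1, i1) rest, 0 ≤ p.2 ∧ p.2 ≤ 67 := by
        intro p hp
        rcases mem_pvInsert _ p _ hp with rfl | hp'
        · exact hb1
        · exact hidx p (by simp [hp'])
      cases hq1 : pvInsert (c1 + 1, i1) rest with
      | nil => simpa using hg
      | cons hd rest2 =>
        obtain ⟨c2, i2⟩ := hd
        dsimp only
        have hb2 : 0 ≤ i2 ∧ i2 ≤ 67 := by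
          have := hidx1 (c2, i2) (by rw [hq1]; simp)
          simpa using this
        have hgood1 : GoodTok [pvChr i1] := by
          refine ⟨by simp, ?_⟩
          intro c hc
          simp at hc
          subst hc
          exact pvChr_good i1 hb1.1 hb1.2
        have hgood2 : GoodTok [pvChr i1, pvChr i2] := by
          refine ⟨by simp, ?_⟩
          intro c hc
          simp at hc
          rcases hc with hc | hc <;> subst hc
          · exact pvChr_good i1 hb1.1 hb1.2
          · exact pvChr_good i2 hb2.1 hb2.2
        have hidx2 : ∀ p ∈ (c2, i2) :: rest2, 0 ≤ p.2 ∧ p.2 ≤ 67 := by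
          intro p hp; exact hidx1 p (by rw [hq1]; exact hp)
        by_cases hc : -c2 > 0 ∧ s ≠ 3
        · rw [if_pos hc]
          refine ih _ _ _ ?_ ?_
          · intro p hp
            rcases mem_pvInsert _ p _ hp with rfl | hp'
            · exact hb2
            · exact hidx2 p (by simp [hp'])
          · intro t ht
            rcases List.mem_append.mp ht with h | h
            · exact hg t h
            · simp at h
              subst h
              exact hgood2
        · rw [if_neg hc]
          refine ih _ _ _ hidx2 ?_
          intro t ht
          rcases List.mem_append.mp ht with h | h
          · exact hg t h
          · simp at h
            subst h
            exact hgood1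

lemma lstrip_cons_of (c : Char) (cs : List Char) (h : PySem.Chars.isspace c = false) :
    PySem.Chars.lstrip (c :: cs) = c :: cs := by
  simp [PySem.Chars.lstrip, h]

lemma rstrip_append_space (u : List Char) :
    PySem.Chars.rstrip (u ++ [' ']) = PySem.Chars.rstrip u := by
  simp [PySem.Chars.rstrip, List.reverse_append,
    show PySem.Chars.isspace ' ' = true from by decide]

lemma rstrip_concat_of (u : List Char) (c : Char) (h : PySem.Chars.isspace c = false) :
    PySem.Chars.rstrip (u ++ [c]) = u ++ [c] := by
  simp [PySem.Chars.rstrip, List.reverse_append, h]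

lemma flatMap_tokens (toks : List (List Char)) (hne : toks ≠ []) :
    toks.flatMap (fun t => t ++ [' ']) = PySem.Chars.join [' '] toks ++ [' '] := by
  induction toks with
  | nil => exact absurd rfl hne
  | cons t rest ih =>
    cases rest with
    | nil => simp [PySem.Chars.join, List.intercalate]
    | cons u r =>
      rw [List.flatMap_cons, ih (by simp), PySem.Chars.join_cons_cons]
      simp [List.append_assoc]

lemma join_head (toks : List (List Char)) (hne : toks ≠ []) (h : ∀ t ∈ toks, GoodTok t) :
    ∃ c w, PySem.Chars.join [' '] toks = c :: w ∧ PySem.Chars.isspace c = false := by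
  cases toks with
  | nil => exact absurd rfl hne
  | cons t rest =>
    obtain ⟨htne, htg⟩ := h t (by simp)
    cases t with
    | nil => exact absurd rfl htne
    | cons c t' =>
      have hc := htg c (by simp)
      cases rest with
      | nil => exact ⟨c, t', by simp [PySem.Chars.join, List.intercalate],
          notspace_of_good c hc.1 hc.2⟩
      | cons u r =>
        refine ⟨c, t' ++ [' '] ++ PySem.Chars.join [' '] (u :: r), ?_,
          notspace_of_good c hc.1 hc.2⟩
        rw [PySem.Chars.join_cons_cons]
        simp

lemma join_last (toks : List (List Char)) (hne : toks ≠ []) (h : ∀ t ∈ toks, GoodTok t) :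
    ∃ w c, PySem.Chars.join [' '] toks = w ++ [c] ∧ PySem.Chars.isspace c = false := by
  induction toks with
  | nil => exact absurd rfl hne
  | cons t rest ih =>
    cases rest with
    | nil =>
      obtain ⟨htne, htg⟩ := h t (by simp)
      rcases List.eq_nil_or_concat t with h' | ⟨w, c, h'⟩
      · exact absurd h' htne
      · refine ⟨w, c, by simpa [PySem.Chars.join, List.intercalate] using h', ?_⟩
        have hc := htg c (by simp [h'])
        exact notspace_of_good c hc.1 hc.2
    | cons u r =>
      obtain ⟨w, c, hw, hc⟩ := ih (by simp) (fun t' ht' => h t' (by simp [ht']))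
      refine ⟨t ++ [' '] ++ w, c, ?_, hc⟩
      rw [PySem.Chars.join_cons_cons, hw]
      simp

lemma strip_flatMap (toks : List (List Char)) (h : ∀ t ∈ toks, GoodTok t) :
    PySem.Chars.strip (toks.flatMap (fun t => t ++ [' '])) = PySem.Chars.join [' '] toks := by
  rcases List.eq_nil_or_concat toks with hnil | ⟨_, _, hcon⟩
  · subst hnil; simp [PySem.Chars.strip, PySem.Chars.lstrip, PySem.Chars.rstrip,
      PySem.Chars.join, List.intercalate]
  · have hne : toks ≠ [] := by simp [hcon]
    obtain ⟨c, w, hcw, hc⟩ := join_head toks hne h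
    obtain ⟨w', c', hw', hc'⟩ := join_last toks hne h
    rw [flatMap_tokens toks hne]
    show PySem.Chars.rstrip (PySem.Chars.lstrip _) = _
    rw [hcw, show (c :: w) ++ [' '] = c :: (w ++ [' ']) from by simp,
      lstrip_cons_of c _ hc, show c :: (w ++ [' ']) = (c :: w) ++ [' '] from by simp,
      ← hcw, rstrip_append_space, hw', rstrip_concat_of _ _ hc']

lemma foldA_eq (plan : List (Int × Option Int)) :
    plan.foldl (fun acc p =>
      let acc1 := acc ++ [pvChr p.1]
      let acc2 := match p.2 with
        | some second => acc1 ++ [pvChr second]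
        | none => acc1
      acc2 ++ [' ']) ([] : List Char) =
      (plan.map renderPair).flatMap (fun t => t ++ [' ']) := by
  rw [List.flatMap_map,
    PySem.List.foldl_congr_mem _ _ (fun acc p => acc ++ (renderPair p ++ [' '])) _
      (by intro acc p _; cases hp : p.2 <;> simp [renderPair, hp]),
    PySem.List.foldl_append_eq_flatMap]
  simp

-- ===== VERDICT (by name: the statement is the Claim_ definition above) =====
theorem solveQuestion_spec : Claim_equal_solveQuestion := by
  intro members _ hpre
  obtain ⟨hne, hnn, hlen⟩ := hpre
  unfold Spec_solveQuestion solveQuestion solveQuestion_alt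
  cases hmax : PySem.List.max? members (fun x => x) with
  | none => exact absurd ((PySem.List.max?_eq_none_iff _ _).mp hmax) hne
  | some m =>
    dsimp only
    have hq0 := rep_initial members
    have hloops := loops_eq (((members.map (fun x => max x 0)).sum).toNat + 1)
      members _ [] [] members.sum hq0 hne hnn rfl (by simp)
    rw [foldA_eq, hloops]
    refine congrArg String.ofList (strip_flatMap _ (altLoop_good _ _ _ _ ?_ (by simp)))
    intro p hp
    have := hq0.2.mem_iff.mp hp
    obtain ⟨k, hk, rfl⟩ := (mem_pvKeys members _).mp this
    refine ⟨by simp, ?_⟩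
    simp
    omega
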